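-- pv_equiv track=rewrite | github.com/yunxingluaaron/Form_AutoMation_PITT_Aaron | form-automation/backend/form_mapping.py | generate_treatment_recommendations
-- ===== SOURCE A (Python) =====
-- def generate_treatment_recommendations(patient_data):
--     """Generate treatment recommendations based on patient data"""
--     # This is a placeholder - in a real implementation, this would use
--     # more sophisticated logic or even an LLM to generate recommendations
--
--     diagnoses = patient_data.get("diagnoses", [])
--     symptoms = patient_data.get("symptoms", [])
--
--     if not diagnoses and not symptoms:
--         return "Treatment recommendations to be determined following comprehensive assessment."
--
--     # Basic recommendation based on diagnostic categories
--     has_autism = any("autism" in dx.get("name", "").lower() for dx in diagnoses)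
--     has_adhd = any("attention" in dx.get("name", "").lower() for dx in diagnoses)
--
--     recommendations = []
--
--     if has_autism:
--         recommendations.append("Applied Behavior Analysis (ABA) therapy recommended for Autism Spectrum Disorder.")
--
--     if has_adhd:
--         recommendations.append("Behavior management strategies recommended for attention-related concerns.")
--
--     # Generic recommendations if nothing specific was identified
--     if not recommendations:
--         recommendations.append("Individual therapy sessions recommended to address identified behavioral health concerns.")
--         recommendations.append("Family involvement in treatment process is recommended.")
--
--     return "\n".join(recommendations)
-- ===== SOURCE B (Python) =====
-- _TABLE = [
--     "Individual therapy sessions recommended to address identified behavioral health concerns.\nFamily involvement in treatment process is recommended.",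
--     "Behavior management strategies recommended for attention-related concerns.",
--     "Applied Behavior Analysis (ABA) therapy recommended for Autism Spectrum Disorder.",
--     "Applied Behavior Analysis (ABA) therapy recommended for Autism Spectrum Disorder.\nBehavior management strategies recommended for attention-related concerns.",
-- ]
--
--
-- def generate_treatment_recommendations(patient_data):
--     """Generate treatment recommendations based on patient data (bitmask + lookup table)"""
--     diagnoses = patient_data.get("diagnoses", [])
--     symptoms = patient_data.get("symptoms", [])
--
--     if not diagnoses and not symptoms:
--         return "Treatment recommendations to be determined following comprehensive assessment."
--
--     mask = 0
--     for dx in diagnoses: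
--         name = dx.get("name", "").lower()
--         mask |= (("autism" in name) << 1) | ("attention" in name)
--
--     return _TABLE[mask]
-- ===== Notes on version B (the rewrite author's own statement) =====
-- stated objective: alternative
-- what changed: B accumulates a 2-bit keyword mask in one loop over diagnoses and returns the matching entry of a precomputed 4-string lookup table, eliminating A's two any() scans, the flag branches, the mutable recommendation list and the runtime join.
import Mathlib
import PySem

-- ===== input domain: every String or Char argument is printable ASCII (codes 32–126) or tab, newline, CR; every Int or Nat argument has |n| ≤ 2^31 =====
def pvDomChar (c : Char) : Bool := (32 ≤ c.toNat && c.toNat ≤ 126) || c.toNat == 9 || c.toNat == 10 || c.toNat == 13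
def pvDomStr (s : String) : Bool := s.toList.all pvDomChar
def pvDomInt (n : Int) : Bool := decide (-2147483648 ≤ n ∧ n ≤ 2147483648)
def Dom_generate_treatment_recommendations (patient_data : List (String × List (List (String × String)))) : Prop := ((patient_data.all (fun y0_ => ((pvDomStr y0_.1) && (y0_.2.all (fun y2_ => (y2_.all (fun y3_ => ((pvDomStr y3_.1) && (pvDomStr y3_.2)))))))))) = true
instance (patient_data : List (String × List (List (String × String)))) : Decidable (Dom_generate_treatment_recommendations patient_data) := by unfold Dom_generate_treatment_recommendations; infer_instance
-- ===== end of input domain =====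

-- B replaces A's two any(...) scans, flag branches and join with a single bitmask-accumulating loop indexing a precomputed 4-entry output table (alternative decomposition; same cost).


-- ===== PORT A =====
-- A: scans `diagnoses` twice with two separate any(...) passes, appends into one accumulator list, joins.
def pvNameOf (dx : List (String × String)) : String :=
  PySem.Str.lower (PySem.Dict.getD (PySem.Dict.mk dx) "name" "")

def generate_treatment_recommendations (patient_data : List (String × List (List (String × String)))) : String :=
  let diagnoses := PySem.Dict.getD (PySem.Dict.mk patient_data) "diagnoses" []
  let symptoms := PySem.Dict.getD (PySem.Dict.mk patient_data) "symptoms" []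
  if diagnoses.isEmpty && symptoms.isEmpty then
    "Treatment recommendations to be determined following comprehensive assessment."
  else
    let has_autism := diagnoses.any (fun dx => PySem.Str.isIn "autism" (pvNameOf dx))
    let has_adhd := diagnoses.any (fun dx => PySem.Str.isIn "attention" (pvNameOf dx))
    let recommendations : List String := []
    let recommendations := if has_autism then recommendations ++ ["Applied Behavior Analysis (ABA) therapy recommended for Autism Spectrum Disorder."] else recommendations
    let recommendations := if has_adhd then recommendations ++ ["Behavior management strategies recommended for attention-related concerns."] else recommendations
    let recommendations := if recommendations.isEmpty then recommendations ++ ["Individual therapy sessions recommended to address identified behavioral health concerns.", "Family involvement in treatment process is recommended."] else recommendations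
    PySem.Str.join "\n" recommendations

-- ===== PORT B =====
-- B: one loop over diagnoses OR-ing a 2-bit mask (bit 1 = "autism", bit 0 = "attention"),
-- then the answer is the mask-th entry of a precomputed table of complete output strings.
def pvTable : List String :=
  ["Individual therapy sessions recommended to address identified behavioral health concerns.\nFamily involvement in treatment process is recommended.",
   "Behavior management strategies recommended for attention-related concerns.",
   "Applied Behavior Analysis (ABA) therapy recommended for Autism Spectrum Disorder.",
   "Applied Behavior Analysis (ABA) therapy recommended for Autism Spectrum Disorder.\nBehavior management strategies recommended for attention-related concerns."]

def pvFoldMask : List (List (String × String)) → Nat → Nat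
  | [], mask => mask
  | dx :: rest, mask =>
    let name := PySem.Str.lower (PySem.Dict.getD (PySem.Dict.mk dx) "name" "")
    pvFoldMask rest (mask ||| (((if PySem.Str.isIn "autism" name then 1 else 0) <<< 1) |||
                               (if PySem.Str.isIn "attention" name then 1 else 0)))

def generate_treatment_recommendations_alt (patient_data : List (String × List (List (String × String)))) : String :=
  let diagnoses := PySem.Dict.getD (PySem.Dict.mk patient_data) "diagnoses" []
  let symptoms := PySem.Dict.getD (PySem.Dict.mk patient_data) "symptoms" []
  if diagnoses.isEmpty && symptoms.isEmpty then
    "Treatment recommendations to be determined following comprehensive assessment."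
  else
    let mask := pvFoldMask diagnoses 0
    -- Python's _TABLE[mask]; mask < 4 always, so the default is unreachable
    pvTable.getD mask ""

-- ===== PRECONDITION & SPEC =====
def Spec_generate_treatment_recommendations (patient_data : List (String × List (List (String × String)))) (out : String) : Prop := out = generate_treatment_recommendations_alt patient_data
instance (patient_data : List (String × List (List (String × String)))) (out : String) : Decidable (Spec_generate_treatment_recommendations patient_data out) := by unfold Spec_generate_treatment_recommendations; infer_instance

-- ===== CLAIM (what is proved, stated in full; the proofs are below) =====
def Claim_equal_generate_treatment_recommendations : Prop := ∀ (patient_data : List (String × List (List (String × String)))), Dom_generate_treatment_recommendations patient_data → Spec_generate_treatment_recommendations patient_data (generate_treatment_recommendations patient_data)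

-- ===== LEMMAS AND PROOFS =====
lemma pvBitMerge (a b c d : Bool) (m : Nat) :
    m ||| ((if a = true then 1 else 0) <<< 1 ||| (if b = true then 1 else 0)) |||
      ((if c = true then 1 else 0) <<< 1 ||| (if d = true then 1 else 0)) =
    m ||| ((if (a || c) = true then 1 else 0) <<< 1 ||| (if (b || d) = true then 1 else 0)) := by
  cases a <;> cases b <;> cases c <;> cases d <;> simp [Nat.or_assoc]

lemma pvFoldMask_eq (l : List (List (String × String))) (m : Nat) :
    pvFoldMask l m =
      m ||| (((if l.any (fun dx => PySem.Str.isIn "autism" (pvNameOf dx)) then 1 else 0) <<< 1) |||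
             (if l.any (fun dx => PySem.Str.isIn "attention" (pvNameOf dx)) then 1 else 0)) := by
  induction l generalizing m with
  | nil => simp [pvFoldMask]
  | cons dx rest ih =>
    simp only [pvFoldMask, ih, List.any_cons, pvNameOf]
    exact pvBitMerge _ _ _ _ m

-- ===== VERDICT (by name: the statement is the Claim_ definition above) =====
set_option maxRecDepth 4000 in
theorem generate_treatment_recommendations_spec : Claim_equal_generate_treatment_recommendations := by
  intro patient_data _
  unfold Spec_generate_treatment_recommendations generate_treatment_recommendations
    generate_treatment_recommendations_alt
  simp only [pvFoldMask_eq, Nat.zero_or]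
  split
  · rfl
  · cases (PySem.Dict.getD (PySem.Dict.mk patient_data) "diagnoses" []).any
        (fun dx => PySem.Str.isIn "autism" (pvNameOf dx)) <;>
    cases (PySem.Dict.getD (PySem.Dict.mk patient_data) "diagnoses" []).any
        (fun dx => PySem.Str.isIn "attention" (pvNameOf dx)) <;> rfl
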